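-- pv_equiv track=rewrite | github.com/mlauryn/EsatanOpt | RU/Pre_process.py | idx_dict
-- ===== SOURCE A (Python) =====
-- from collections import defaultdict
--
-- def idx_dict(src, ref):
--     """
--     Group node value indexes in src by corresponding node labels in ref
--
--     """
--     indices = defaultdict(list)
--
--     for idx, val in enumerate(src):
--         for name in ref:
--             if val not in ref[name]:
--                 continue
--
--             indices[name].append(idx)
--
--     return indices
-- ===== SOURCE B (Python) =====
-- def idx_dict(src, ref):
--     # Inverse index: value -> the ref names whose list contains it (ref order, no repeats).
--     inv = {}
--     for name in ref:
--         for v in ref[name]: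
--             names = inv.get(v, [])
--             if name not in names:
--                 inv[v] = names + [name]
--     # One lookup per source element.
--     out = {}
--     for idx, val in enumerate(src):
--         for name in inv.get(val, ()):
--             out.setdefault(name, []).append(idx)
--     return out
-- ===== Notes on version B (the rewrite author's own statement) =====
-- stated objective: faster
-- what changed: B precomputes an inverse index mapping each value to the ref names whose list contains it (in ref order, deduplicated), then looks each src element up in it, instead of A's scan over every ref entry for every src element.
import Mathlib
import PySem

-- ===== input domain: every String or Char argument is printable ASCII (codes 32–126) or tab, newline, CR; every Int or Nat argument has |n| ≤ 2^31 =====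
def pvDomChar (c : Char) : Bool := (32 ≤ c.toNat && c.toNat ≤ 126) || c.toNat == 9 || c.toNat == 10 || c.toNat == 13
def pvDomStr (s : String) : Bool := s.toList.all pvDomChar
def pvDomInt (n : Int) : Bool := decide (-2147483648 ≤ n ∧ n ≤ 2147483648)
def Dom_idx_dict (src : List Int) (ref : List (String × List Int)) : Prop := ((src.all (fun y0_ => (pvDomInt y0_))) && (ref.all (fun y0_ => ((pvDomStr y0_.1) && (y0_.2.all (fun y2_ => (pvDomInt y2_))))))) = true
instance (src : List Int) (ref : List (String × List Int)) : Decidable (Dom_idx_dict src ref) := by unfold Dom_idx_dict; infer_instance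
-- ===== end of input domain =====

-- B replaces A's per-element scan of every ref entry by a precomputed inverse index
-- value -> names (asymptotically faster on large src); return values are proved equal.

-- ===== PORT A =====
-- for idx, val in enumerate(src): for name in ref: if val not in ref[name]: continue; indices[name].append(idx)
def idx_dict (src : List Int) (ref : List (String × List Int)) : List (String × List Int) :=
  let d := PySem.Dict.ofList ref
  ((PySem.List.enumerate src).foldl (fun indices p =>
      d.items.foldl (fun ind nr =>
        if p.2 ∈ nr.2 then ind.insert nr.1 (ind.getD nr.1 [] ++ [p.1]) else ind) indices)
    PySem.Dict.empty).items

-- ===== PORT B =====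
def idx_dict_alt (src : List Int) (ref : List (String × List Int)) : List (String × List Int) :=
  let d := PySem.Dict.ofList ref
  -- inverse index: value -> the ref names whose list contains it (ref order, no repeats)
  let inv : PySem.Dict Int (List String) := d.items.foldl (fun m nr =>
      nr.2.foldl (fun m2 v =>
        let names := m2.getD v []
        if nr.1 ∈ names then m2 else m2.insert v (names ++ [nr.1])) m)
    PySem.Dict.empty
  -- out.setdefault(name, []).append(idx)  =  setdefault, then in-place append = modify
  ((PySem.List.enumerate src).foldl (fun out p =>
      (inv.getD p.2 []).foldl (fun o name =>
        (o.setdefault name []).modify name [] (· ++ [p.1])) out)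
    PySem.Dict.empty).items

-- ===== PRECONDITION & SPEC =====
def Spec_idx_dict (src : List Int) (ref : List (String × List Int)) (out : List (String × List Int)) : Prop := out = idx_dict_alt src ref
instance (src : List Int) (ref : List (String × List Int)) (out : List (String × List Int)) : Decidable (Spec_idx_dict src ref out) := by unfold Spec_idx_dict; infer_instance

-- ===== CLAIM (what is proved, stated in full; the proofs are below) =====
def Claim_equal_idx_dict : Prop := ∀ (src : List Int) (ref : List (String × List Int)), Dom_idx_dict src ref → Spec_idx_dict src ref (idx_dict src ref)

-- ===== LEMMAS AND PROOFS =====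

-- One ref entry (name, vals): after B's inner loop, the bucket of w gains name iff w ∈ vals and name was absent.
theorem inv_inner_getD (name : String) (vals : List Int) (m : PySem.Dict Int (List String)) (w : Int) :
    (vals.foldl (fun m2 v =>
        let names := m2.getD v []
        if name ∈ names then m2 else m2.insert v (names ++ [name])) m).getD w []
    = if w ∈ vals ∧ name ∉ m.getD w [] then m.getD w [] ++ [name] else m.getD w [] := by
  induction vals generalizing m with
  | nil => simp
  | cons v0 rest ih =>
    simp only [List.foldl_cons]
    by_cases h0 : name ∈ m.getD v0 []
    · simp only [h0, if_pos]
      rw [ih]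
      by_cases hw : w = v0
      · subst hw; simp [h0]
      · simp [List.mem_cons, hw]
    · simp only [h0, if_false]
      rw [ih]
      by_cases hw : w = v0
      · subst hw
        simp [h0]
      · rw [PySem.Dict.getD_insert]
        simp [List.mem_cons, hw]

-- B's inverse-index loop: the bucket of w is the names of the entries whose value list contains w.
theorem inv_getD (L : List (String × List Int)) (m : PySem.Dict Int (List String)) (w : Int)
    (hnd : (L.map (·.1)).Nodup) (h : ∀ nr ∈ L, nr.1 ∉ m.getD w []) :
    (L.foldl (fun m nr =>
        nr.2.foldl (fun m2 v =>
          let names := m2.getD v []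
          if nr.1 ∈ names then m2 else m2.insert v (names ++ [nr.1])) m) m).getD w []
    = m.getD w [] ++ (L.filter (fun nr => w ∈ nr.2)).map (·.1) := by
  induction L generalizing m with
  | nil => simp
  | cons nr rest ih =>
    simp only [List.map_cons, List.nodup_cons] at hnd
    simp only [List.foldl_cons]
    rw [ih _ hnd.2]
    · rw [inv_inner_getD]
      have hnm : nr.1 ∉ m.getD w [] := h nr (by simp)
      by_cases hwv : w ∈ nr.2
      · simp [hwv, hnm]
      · simp [hwv]
    · intro q hq
      rw [inv_inner_getD]
      have hq1 : q.1 ∉ m.getD w [] := h q (by simp [hq])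
      have hne : q.1 ≠ nr.1 := by
        intro e
        exact hnd.1 (e ▸ (List.mem_map.mpr ⟨q, hq, rfl⟩))
      split_ifs with hc
      · simp [hq1, hne]
      · exact hq1

-- B's 'setdefault(name, []).append(idx)' and A's defaultdict append are the same dict update.
theorem setdefault_modify_eq_insert (d : PySem.Dict String (List Int)) (k : String) (x : Int) :
    (d.setdefault k []).modify k [] (· ++ [x]) = d.insert k (d.getD k [] ++ [x]) := by
  by_cases hc : d.contains k = true
  · rw [PySem.Dict.setdefault_of_contains (h := hc)]
    apply PySem.Dict.ext
    simp [PySem.Dict.modify, PySem.Dict.getD_eq_get?_getD]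
  · have hc' : d.contains k = false := by simpa using hc
    have hg : d.getD k [] = ([] : List Int) := PySem.Dict.getD_of_not_contains d [] hc'
    rw [PySem.Dict.setdefault_of_not_contains (h := hc'), hg]
    apply PySem.Dict.ext
    simp [PySem.Dict.modify, PySem.Dict.insert_insert_self]

-- ===== VERDICT (by name: the statement is the Claim_ definition above) =====
theorem idx_dict_spec : Claim_equal_idx_dict := by
  intro src ref _
  unfold Spec_idx_dict idx_dict idx_dict_alt
  dsimp only
  have hinv : ∀ w : Int,
      ((PySem.Dict.ofList ref).items.foldl (fun m nr =>
          nr.2.foldl (fun m2 v =>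
            let names := m2.getD v []
            if nr.1 ∈ names then m2 else m2.insert v (names ++ [nr.1])) m)
        (PySem.Dict.empty : PySem.Dict Int (List String))).getD w []
      = ((PySem.Dict.ofList ref).items.filter (fun nr => w ∈ nr.2)).map (·.1) := by
    intro w
    rw [inv_getD]
    · simp
    · have := PySem.Dict.nodup_keys_ofList (ps := ref)
      simpa [PySem.Dict.keys] using this
    · intro nr _
      simp
  have hstep : (fun (indices : PySem.Dict String (List Int)) (p : Int × Int) =>
      (PySem.Dict.ofList ref).items.foldl (fun ind nr =>
        if p.2 ∈ nr.2 then ind.insert nr.1 (ind.getD nr.1 [] ++ [p.1]) else ind) indices)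
    = (fun (indices : PySem.Dict String (List Int)) (p : Int × Int) =>
      (((PySem.Dict.ofList ref).items.foldl (fun m nr =>
          nr.2.foldl (fun m2 v =>
            let names := m2.getD v []
            if nr.1 ∈ names then m2 else m2.insert v (names ++ [nr.1])) m)
        (PySem.Dict.empty : PySem.Dict Int (List String))).getD p.2 []).foldl
        (fun o name => (o.setdefault name []).modify name [] (· ++ [p.1])) indices) := by
    funext indices p
    rw [hinv, List.foldl_map, List.foldl_filter]
    simp [setdefault_modify_eq_insert]
  rw [hstep]
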